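-- pv_equiv track=rewrite | github.com/peresonacifer/Compitive_Programming | python/apple division.py | num_sum
-- ===== SOURCE A (Python) =====
-- def num_sum(n, weights : list, group2 : list, group1_sum = 0) -> set :
--     result = set()
--     temp = group1_sum
--     if n == 0:
--         result.add(abs(sum(group2) - temp))
--         return result
--
--
--     else:
--
--         for i in range(len(weights) - (n - 1)):
--             temp += weights[i]
--             remain = weights[i + 1 : ]
--             group2.remove(weights[i])
--             result = result | num_sum(n - 1, remain, group2 = group2, group1_sum = temp)
--             group2.append(weights[i])
--             temp = group1_sum
--
--     return result
-- ===== SOURCE B (Python) =====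
-- def num_sum(n, weights: list, group2: list, group1_sum=0) -> set:
--     # DP over achievable sums of exactly-k-element subsets of weights.
--     if n < 0 or n > len(weights):
--         return set()
--     T = sum(group2) - group1_sum
--     dp = [{0}] + [set() for _ in range(n)]
--     for w in weights:
--         dp = [dp[0]] + [dp[k + 1] | {s + w for s in dp[k]} for k in range(n)]
--     return {abs(T - 2 * s) for s in dp[n]}
-- ===== Notes on version B (the rewrite author's own statement) =====
-- stated objective: faster
-- what changed: Replaces A's exponential recursion over all C(m,n) size-n selections (with in-place remove/append on group2) by a subset-sum dynamic programme tracking the set of achievable sums for each exact count k, then maps each sum s to abs(sum(group2)-group1_sum-2*s); intended as faster — a timing run measured B 2130x faster at the largest size A still finished and A timed out beyond that (recorded as unconfirmed).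
import Mathlib
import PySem

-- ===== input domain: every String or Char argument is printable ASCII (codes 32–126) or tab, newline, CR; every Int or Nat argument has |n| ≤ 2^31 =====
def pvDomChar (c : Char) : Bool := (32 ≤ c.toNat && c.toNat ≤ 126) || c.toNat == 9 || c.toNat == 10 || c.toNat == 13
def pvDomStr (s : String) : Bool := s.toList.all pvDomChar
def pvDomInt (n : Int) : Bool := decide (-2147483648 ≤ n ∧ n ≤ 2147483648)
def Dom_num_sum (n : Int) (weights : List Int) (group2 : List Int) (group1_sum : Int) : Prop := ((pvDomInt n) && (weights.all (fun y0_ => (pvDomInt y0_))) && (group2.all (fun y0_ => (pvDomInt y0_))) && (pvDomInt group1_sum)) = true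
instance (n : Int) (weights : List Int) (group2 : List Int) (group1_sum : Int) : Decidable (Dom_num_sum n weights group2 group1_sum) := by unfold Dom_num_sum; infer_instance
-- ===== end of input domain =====

-- B replaces A's exponential recursive enumeration of all size-n selections (with group2
-- mutated by remove/append) by a subset-sum DP counting chosen items; intended as faster
-- (a timing run measured B 2130x at the largest size where A still finished; A timed
-- out beyond that, so the speed-up could not be fully confirmed).
-- A mutates group2's ORDER in place (remove first occurrence / append at end); the
-- equivalence proved here is about the RETURN value only.
-- Both functions return a Python set, whose iteration order is unspecified (PySem does not
-- model it); both ports therefore represent a set of ints canonically as its strictly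
-- increasing list of elements (sinsert = insert into sorted position unless present), so
-- set equality becomes list equality.  This representation choice is shared by the two
-- ports; every set operation (add, union, comprehension) is modelled element-exactly.

-- ===== PORT A =====

/-- set.add on the canonical representation: insert `x` into a strictly-increasing list. -/
def sinsert (x : Int) : List Int → List Int
  | [] => [x]
  | y :: ys => if x < y then x :: y :: ys else if x = y then y :: ys else y :: sinsert x ys

/-- set union `a | b` on the canonical representation. -/
def sunion (a b : List Int) : List Int := b.foldl (fun acc x => sinsert x acc) a

mutual
/-- transliteration of A: `num_sum(n, weights, group2, group1_sum)`; `none` = Python raises.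
    Returns (result set, final group2 list). -/
def numSumAux (n : Int) (weights : List Int) (group2 : List Int) (g1 : Int) :
    Option (List Int × List Int) :=
  if n = 0 then
    -- result.add(abs(sum(group2) - temp)); return result
    some ([|group2.sum - g1|], group2)
  else
    -- for i in range(len(weights) - (n - 1)): …
    numSumGo n weights group2 g1 (List.range (((weights.length : Int) - (n - 1)).toNat)) []
  termination_by (weights.length, 1, 0)
  decreasing_by exact Prod.Lex.right _ (Prod.Lex.left _ _ (by omega))

/-- the `for i in range(…)` loop body of A, threading (group2, result). -/
def numSumGo (n : Int) (weights : List Int) (group2 : List Int) (g1 : Int)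
    (idxs : List Nat) (result : List Int) : Option (List Int × List Int) :=
  match idxs with
  | [] => some (result, group2)
  | i :: rest =>
    if h : i < weights.length then        -- weights[i] (i ≥ 0; out of range = IndexError)
      let wi := weights[i]
      -- temp += weights[i]; remain = weights[i+1:] (i ≥ 0, so the slice is a drop)
      let remain := weights.drop (i + 1)
      match PySem.List.remove? group2 wi with   -- group2.remove(weights[i]); ValueError = none
      | none => none
      | some g2r =>
        match numSumAux (n - 1) remain g2r (g1 + wi) with
        | none => none
        | some (sub, g2') =>
            -- result = result | …; group2.append(weights[i]); temp = group1_sum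
            numSumGo n weights (g2' ++ [wi]) g1 rest (sunion result sub)
    else none
  termination_by (weights.length, 0, idxs.length)
  decreasing_by
    · exact Prod.Lex.left _ _ (by simp [List.length_drop]; omega)
    · exact Prod.Lex.right _ (Prod.Lex.right _ (by simp))
end

def num_sum (n : Int) (weights : List Int) (group2 : List Int) (group1_sum : Int) : List Int :=
  ((numSumAux n weights group2 group1_sum).map Prod.fst).getD []

-- ===== PORT B =====

/-- one step of B's loop: `dp = [dp[0]] + [dp[k+1] | {s+w for s in dp[k]} for k in range(n)]`. -/
def Bstep (m : Nat) (dp : List (List Int)) (w : Int) : List (List Int) :=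
  dp.headD [] ::
    (List.range m).map (fun k => sunion (dp.getD (k + 1) []) ((dp.getD k []).map (· + w)))

/-- transliteration of B (Source B): DP over achievable sums of exactly-k-element subsets.
    `dp0 = [{0}] + [set() for _ in range(n)]`; finally `{abs(T - 2*s) for s in dp[n]}`
    with `T = sum(group2) - group1_sum`. -/
def num_sum_alt (n : Int) (weights : List Int) (group2 : List Int) (group1_sum : Int) : List Int :=
  if n < 0 ∨ (weights.length : Int) < n then []
  else
    ((weights.foldl (Bstep n.toNat) ([(0 : Int)] :: List.replicate n.toNat [])).getD n.toNat []).foldl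
      (fun acc s => sinsert (|group2.sum - group1_sum - 2 * s|) acc) []

-- ===== PRECONDITION & SPEC =====
-- Pre_ excludes exactly the inputs on which A raises: n < 0 (the loop then indexes weights
-- out of range → IndexError), and 1 ≤ n ≤ len(weights) when some branch of the enumeration
-- must hold removed from group2 more copies of a value than group2 contains
-- (group2.remove → ValueError).
def Pre_num_sum (n : Int) (weights : List Int) (group2 : List Int) (group1_sum : Int) : Prop :=
  0 ≤ n ∧ (n.toNat ≤ weights.length →
    ∀ x ∈ weights, min n.toNat (weights.count x) ≤ group2.count x)
instance (n : Int) (weights : List Int) (group2 : List Int) (group1_sum : Int) : Decidable (Pre_num_sum n weights group2 group1_sum) := by unfold Pre_num_sum; infer_instance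
def pvWitness_num_sum : Int × List Int × List Int × Int := (1, [2, 3], [2, 3, 4], 0)

def Spec_num_sum (n : Int) (weights : List Int) (group2 : List Int) (group1_sum : Int) (out : List Int) : Prop := out = num_sum_alt n weights group2 group1_sum
instance (n : Int) (weights : List Int) (group2 : List Int) (group1_sum : Int) (out : List Int) : Decidable (Spec_num_sum n weights group2 group1_sum out) := by unfold Spec_num_sum; infer_instance

-- ===== CLAIM (what is proved, stated in full; the proofs are below) =====
def Claim_equal_num_sum : Prop := ∀ (n : Int) (weights : List Int) (group2 : List Int) (group1_sum : Int), Dom_num_sum n weights group2 group1_sum → Pre_num_sum n weights group2 group1_sum → Spec_num_sum n weights group2 group1_sum (num_sum n weights group2 group1_sum)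

-- ===== LEMMAS AND PROOFS =====

-- ---- the canonical set representation ----

lemma mem_sinsert (a x : Int) (l : List Int) : a ∈ sinsert x l ↔ a = x ∨ a ∈ l := by
  induction l with
  | nil => simp [sinsert]
  | cons y ys ih =>
    simp only [sinsert]
    split_ifs with h1 h2
    · simp [List.mem_cons]
    · subst h2; simp [List.mem_cons]
    · simp [List.mem_cons, ih]; tauto

lemma pairwise_sinsert (x : Int) (l : List Int) (h : l.Pairwise (· < ·)) :
    (sinsert x l).Pairwise (· < ·) := by
  induction l with
  | nil => simp [sinsert]
  | cons y ys ih =>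
    rcases List.pairwise_cons.mp h with ⟨hy, hys⟩
    simp only [sinsert]
    split_ifs with h1 h2
    · exact List.pairwise_cons.mpr ⟨by
        intro z hz
        rcases List.mem_cons.mp hz with rfl | hz
        · exact h1
        · exact lt_trans h1 (hy z hz), h⟩
    · exact h
    · refine List.pairwise_cons.mpr ⟨?_, ih hys⟩
      intro z hz
      rcases (mem_sinsert z x ys).mp hz with rfl | hz
      · omega
      · exact hy z hz

lemma mem_foldl_sinsert (f : Int → Int) (l : List Int) :
    ∀ (acc : List Int) (a : Int),
      a ∈ l.foldl (fun acc s => sinsert (f s) acc) acc ↔ a ∈ acc ∨ ∃ s ∈ l, a = f s := by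
  induction l with
  | nil => simp
  | cons x xs ih =>
    intro acc a
    simp only [List.foldl_cons, ih, mem_sinsert, List.mem_cons]
    constructor
    · rintro ((rfl | h) | ⟨s, hs, rfl⟩)
      · exact Or.inr ⟨x, Or.inl rfl, rfl⟩
      · exact Or.inl h
      · exact Or.inr ⟨s, Or.inr hs, rfl⟩
    · rintro (h | ⟨s, rfl | hs, rfl⟩)
      · exact Or.inl (Or.inr h)
      · exact Or.inl (Or.inl rfl)
      · exact Or.inr ⟨s, hs, rfl⟩

lemma pairwise_foldl_sinsert (f : Int → Int) (l : List Int) :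
    ∀ (acc : List Int), acc.Pairwise (· < ·) →
      (l.foldl (fun acc s => sinsert (f s) acc) acc).Pairwise (· < ·) := by
  induction l with
  | nil => intro acc h; simpa using h
  | cons x xs ih =>
    intro acc hacc
    exact ih _ (pairwise_sinsert _ _ hacc)

lemma mem_sunion (a : Int) (l b : List Int) : a ∈ sunion l b ↔ a ∈ l ∨ a ∈ b := by
  simpa [sunion] using mem_foldl_sinsert (fun s => s) b l a

lemma pairwise_sunion (l b : List Int) (h : l.Pairwise (· < ·)) :
    (sunion l b).Pairwise (· < ·) :=
  pairwise_foldl_sinsert (fun s => s) b l h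

lemma eq_of_pairwise_lt_ext : ∀ (l l' : List Int), l.Pairwise (· < ·) → l'.Pairwise (· < ·) →
    (∀ a, a ∈ l ↔ a ∈ l') → l = l' := by
  intro l
  induction l with
  | nil =>
    intro l' _ _ h
    cases l' with
    | nil => rfl
    | cons y ys => exact absurd ((h y).mpr (List.mem_cons_self)) (by simp)
  | cons x xs ih =>
    intro l' hl hl' h
    cases l' with
    | nil => exact absurd ((h x).mp List.mem_cons_self) (by simp)
    | cons y ys =>
      rcases List.pairwise_cons.mp hl with ⟨hx, hxs⟩
      rcases List.pairwise_cons.mp hl' with ⟨hy, hys⟩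
      have hxy : x = y := by
        rcases List.mem_cons.mp ((h x).mp List.mem_cons_self) with h1 | h1
        · exact h1
        rcases List.mem_cons.mp ((h y).mpr List.mem_cons_self) with h2 | h2
        · exact h2.symm
        have := hx y h2
        have := hy x h1
        omega
      subst hxy
      have : xs = ys := by
        apply ih ys hxs hys
        intro a
        constructor
        · intro ha
          rcases List.mem_cons.mp ((h a).mp (List.mem_cons_of_mem _ ha)) with rfl | h2
          · exact absurd (hx a ha) (by omega)
          · exact h2
        · intro ha
          rcases List.mem_cons.mp ((h a).mpr (List.mem_cons_of_mem _ ha)) with rfl | h2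
          · exact absurd (hy a ha) (by omega)
          · exact h2
      rw [this]

-- ---- subset sums ----

/-- `s` is the sum of some subset of `ws` with exactly `k` elements. -/
def IsSum (ws : List Int) (k : Nat) (s : Int) : Prop :=
  ∃ t : List Int, List.Sublist t ws ∧ t.length = k ∧ t.sum = s

lemma isSum_zero (ws : List Int) (s : Int) : IsSum ws 0 s ↔ s = 0 := by
  constructor
  · rintro ⟨t, _, hlen, hsum⟩
    rw [List.eq_nil_iff_length_eq_zero.mpr hlen] at hsum
    simpa using hsum.symm
  · rintro rfl
    exact ⟨[], List.nil_sublist _, rfl, rfl⟩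

lemma isSum_length (ws : List Int) (k : Nat) (s : Int) (h : IsSum ws k s) : k ≤ ws.length := by
  rcases h with ⟨t, hsub, hlen, _⟩
  simpa [hlen] using hsub.length_le

lemma isSum_snoc (p : List Int) (w : Int) (k : Nat) (s : Int) :
    IsSum (p ++ [w]) k s ↔ IsSum p k s ∨ (1 ≤ k ∧ ∃ s', IsSum p (k - 1) s' ∧ s = s' + w) := by
  constructor
  · rintro ⟨t, hsub, hlen, hsum⟩
    rcases List.sublist_append_iff.mp hsub with ⟨t1, t2, rfl, h1, h2⟩
    rcases List.sublist_singleton.mp h2 with rfl | rfl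
    · exact Or.inl ⟨t1, h1, by simpa using hlen, by simpa using hsum⟩
    · refine Or.inr ⟨by simp at hlen; omega, t1.sum, ⟨t1, h1, by simp at hlen ⊢; omega, rfl⟩, ?_⟩
      simp at hsum; omega
  · rintro (⟨t, hsub, hlen, hsum⟩ | ⟨hk, s', ⟨t, hsub, hlen, hsum⟩, rfl⟩)
    · exact ⟨t, hsub.trans (List.sublist_append_left p [w]), hlen, hsum⟩
    · exact ⟨t ++ [w], List.Sublist.append hsub (List.Sublist.refl [w]),
        by simp [hlen]; omega, by simp [hsum]⟩

lemma cons_sublist_exists (x : Int) (t : List Int) :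
    ∀ (ws : List Int), List.Sublist (x :: t) ws →
      ∃ i, i < ws.length ∧ ws.getD i 0 = x ∧ List.Sublist t (ws.drop (i + 1)) := by
  intro ws
  induction ws with
  | nil => intro h; exact absurd h (by simp)
  | cons y ys ih =>
    intro h
    cases h with
    | cons _ h' =>
      rcases ih h' with ⟨i, hi, hget, hsub⟩
      exact ⟨i + 1, by simpa using hi, by simpa using hget, by simpa using hsub⟩
    | cons₂ _ h' =>
      exact ⟨0, by simp, by simp, by simpa using h'⟩

lemma isSum_succ_iff (w : List Int) (k : Nat) (s : Int) :
    IsSum w (k + 1) s ↔ ∃ i, i < w.length + 1 - (k + 1) ∧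
      ∃ s', IsSum (w.drop (i + 1)) k s' ∧ s = w.getD i 0 + s' := by
  constructor
  · rintro ⟨t, hsub, hlen, hsum⟩
    cases t with
    | nil => simp at hlen
    | cons x t' =>
      rcases cons_sublist_exists x t' w hsub with ⟨i, hi, hget, hsub'⟩
      have hlen' : t'.length = k := by simpa using hlen
      have hbound : k ≤ w.length - (i + 1) := by
        have := hsub'.length_le
        simpa [hlen'] using this
      refine ⟨i, by omega, t'.sum, ⟨t', hsub', hlen', rfl⟩, ?_⟩
      subst hget
      rw [List.sum_cons] at hsum
      omega
  · rintro ⟨i, hi, s', ⟨t', hsub, hlen, hsum⟩, rfl⟩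
    have hiw : i < w.length := by omega
    refine ⟨w.getD i 0 :: t', ?_, by simp [hlen], by simp [hsum]⟩
    have hmem : w.getD i 0 ∈ w.take (i + 1) := by
      rw [List.getD_eq_getElem w 0 hiw]
      have h2 : i < (w.take (i + 1)).length := by simp; omega
      have := List.getElem_take (xs := w) (h := h2)
      rw [← this]
      exact List.getElem_mem h2
    have h1 : List.Sublist [w.getD i 0] (w.take (i + 1)) := List.singleton_sublist.mpr hmem
    have := List.Sublist.append h1 hsub
    simpa [List.take_append_drop] using this

-- ---- B: the DP invariant ----

lemma replicate_getD (m k : Nat) : (List.replicate m ([] : List Int)).getD k [] = [] := by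
  induction m generalizing k with
  | zero => simp
  | succ m ih =>
    cases k with
    | zero => simp [List.replicate]
    | succ k => simp only [List.replicate, List.getD_cons_succ]; exact ih k

/-- the invariant of B's DP: after processing prefix `p`, `dp[k]` is the canonical set of
    sums of exactly-k-element subsets of `p`. -/
def DPInv (p : List Int) (m : Nat) (dp : List (List Int)) : Prop :=
  dp ≠ [] ∧ ∀ k, k ≤ m →
    (dp.getD k []).Pairwise (· < ·) ∧ (∀ a, a ∈ dp.getD k [] ↔ IsSum p k a)

lemma dpinv_init (m : Nat) : DPInv [] m ([(0 : Int)] :: List.replicate m []) := by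
  refine ⟨by simp, ?_⟩
  intro k hk
  cases k with
  | zero =>
    constructor
    · simp
    · intro a; simp [isSum_zero]
  | succ k =>
    constructor
    · simp
    · intro a
      simp only [List.getD_cons_succ, replicate_getD]
      constructor
      · intro h; simp at h
      · rintro ⟨t, hsub, hlen, _⟩
        rw [List.sublist_nil.mp hsub] at hlen
        simp at hlen

lemma dpinv_step (p : List Int) (m : Nat) (dp : List (List Int)) (w : Int)
    (h : DPInv p m dp) : DPInv (p ++ [w]) m (Bstep m dp w) := by
  rcases h with ⟨hne, hinv⟩
  have hhead : dp.headD [] = dp.getD 0 [] := by cases dp with | nil => simp at hne | cons a l => rfl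
  refine ⟨by simp [Bstep], ?_⟩
  intro k hk
  cases k with
  | zero =>
    rcases hinv 0 (Nat.zero_le m) with ⟨hpw, hmem⟩
    constructor
    · simp only [Bstep, List.getD_cons_zero]
      rw [hhead]; exact hpw
    · intro a
      simp only [Bstep, List.getD_cons_zero]
      rw [hhead, hmem a, isSum_zero, isSum_zero]
  | succ k =>
    have hkm : k < m := by omega
    have hget : (Bstep m dp w).getD (k + 1) [] =
        sunion (dp.getD (k + 1) []) ((dp.getD k []).map (· + w)) := by
      simp only [Bstep, List.getD_cons_succ]
      exact PySem.List.getD_map_range _ m k [] hkm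
    rcases hinv (k + 1) hk with ⟨hpw1, hmem1⟩
    rcases hinv k (by omega) with ⟨hpw0, hmem0⟩
    constructor
    · rw [hget]; exact pairwise_sunion _ _ hpw1
    · intro a
      rw [hget, mem_sunion, isSum_snoc, hmem1]
      constructor
      · rintro (h | h)
        · exact Or.inl h
        · rcases List.mem_map.mp h with ⟨s, hs, rfl⟩
          exact Or.inr ⟨by omega, s, by simpa using (hmem0 s).mp hs, rfl⟩
      · rintro (h | ⟨_, s', hs', rfl⟩)
        · exact Or.inl h
        · refine Or.inr (List.mem_map.mpr ⟨s', ?_, rfl⟩)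
          exact (hmem0 s').mpr (by simpa using hs')

lemma dpinv_foldl (ws : List Int) : ∀ (p : List Int) (m : Nat) (dp : List (List Int)),
    DPInv p m dp → DPInv (p ++ ws) m (ws.foldl (Bstep m) dp) := by
  induction ws with
  | nil => intro p m dp h; simpa using h
  | cons w ws ih =>
    intro p m dp h
    have := ih (p ++ [w]) m (Bstep m dp w) (dpinv_step p m dp w h)
    simpa using this

/-- characterisation of B's port. -/
lemma alt_spec (n : Int) (w g2 : List Int) (g1 : Int) (hn : 0 ≤ n) :
    (num_sum_alt n w g2 g1).Pairwise (· < ·) ∧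
    ∀ a, a ∈ num_sum_alt n w g2 g1 ↔
      ∃ s, IsSum w n.toNat s ∧ a = |g2.sum - g1 - 2 * s| := by
  unfold num_sum_alt
  split_ifs with hg
  · have hlen : w.length < n.toNat := by
      rcases hg with h | h
      · omega
      · omega
    refine ⟨by simp, ?_⟩
    intro a
    simp only [List.not_mem_nil, false_iff, not_exists, not_and]
    intro s hs
    exact absurd (isSum_length w n.toNat s hs) (by omega)
  · have hinv := dpinv_foldl w [] n.toNat ([(0 : Int)] :: List.replicate n.toNat [])
      (dpinv_init n.toNat)
    rcases hinv with ⟨_, hinv⟩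
    rcases hinv n.toNat (le_refl _) with ⟨hpw, hmem⟩
    simp only [List.nil_append] at hmem
    constructor
    · exact pairwise_foldl_sinsert _ _ [] (by simp)
    · intro a
      rw [mem_foldl_sinsert]
      simp only [List.not_mem_nil, false_or]
      constructor
      · rintro ⟨s, hs, rfl⟩
        exact ⟨s, (hmem s).mp hs, rfl⟩
      · rintro ⟨s, hs, rfl⟩
        exact ⟨s, (hmem s).mpr hs, rfl⟩

-- ---- A: counting facts for the removability precondition ----

lemma count_drop_le (w : List Int) (j : Nat) (x : Int) :
    (w.drop j).count x ≤ w.count x :=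
  List.Sublist.count_le x (List.drop_sublist j w)

lemma count_drop_self (w : List Int) (i : Nat) (h : i < w.length) :
    (w.drop (i + 1)).count w[i] + 1 ≤ w.count w[i] := by
  have hmem : w[i] ∈ w.take (i + 1) := by
    have h2 : i < (w.take (i + 1)).length := by simp; omega
    have := List.getElem_take (xs := w) (h := h2)
    rw [← this]
    exact List.getElem_mem h2
  have hc := List.count_pos_iff.mpr hmem
  have hsplit : w.count w[i] = (w.take (i + 1)).count w[i] + (w.drop (i + 1)).count w[i] := by
    rw [← List.count_append, List.take_append_drop]
  omega

-- ---- A: the loop invariant, with the recursion hypothesis as a parameter ----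

lemma goSpec (n : Int) (w g2 : List Int) (g1 : Int) (hn : 1 ≤ n)
    (hcnt : ∀ x ∈ w, min n.toNat (w.count x) ≤ g2.count x)
    (IH : ∀ w' : List Int, w'.length < w.length → ∀ (g2' : List Int) (g1' : Int),
      ((n - 1).toNat ≤ w'.length → ∀ x ∈ w', min (n - 1).toNat (w'.count x) ≤ g2'.count x) →
      ∃ res gf, numSumAux (n - 1) w' g2' g1' = some (res, gf) ∧ gf.Perm g2' ∧
        res.Pairwise (· < ·) ∧
        (∀ a, a ∈ res ↔ ∃ s, IsSum w' (n - 1).toNat s ∧ a = |g2'.sum - g1' - 2 * s|)) :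
    ∀ (idxs : List Nat) (g2c result : List Int),
      (∀ i ∈ idxs, i < w.length) → g2c.Perm g2 → result.Pairwise (· < ·) →
      ∃ res gf, numSumGo n w g2c g1 idxs result = some (res, gf) ∧ gf.Perm g2 ∧
        res.Pairwise (· < ·) ∧
        (∀ a, a ∈ res ↔ a ∈ result ∨ ∃ i ∈ idxs, ∃ s',
          IsSum (w.drop (i + 1)) (n - 1).toNat s' ∧
          a = |g2.sum - g1 - 2 * (w.getD i 0 + s')|) := by
  intro idxs
  induction idxs with
  | nil =>
    intro g2c result _ hperm hpw
    refine ⟨result, g2c, by simp [numSumGo], hperm, hpw, ?_⟩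
    simp
  | cons i rest ih =>
    intro g2c result hidx hperm hpw
    have hi : i < w.length := hidx i List.mem_cons_self
    -- the removal succeeds
    have hwmem : w[i] ∈ w := List.getElem_mem hi
    have hcm : 0 < g2c.count w[i] := by
      have h1 := hcnt w[i] hwmem
      have h2 : 0 < w.count w[i] := List.count_pos_iff.mpr hwmem
      have h3 := hperm.count w[i]
      omega
    have hmem2 : w[i] ∈ g2c := List.count_pos_iff.mp hcm
    have hrem : PySem.List.remove? g2c w[i] = some (g2c.erase w[i]) :=
      PySem.List.remove?_eq_some_erase _ _ hmem2
    -- recursion hypothesis applies to the removed branch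
    have hlt : (w.drop (i + 1)).length < w.length := by simp; omega
    have hcnt' : (n - 1).toNat ≤ (w.drop (i + 1)).length →
        ∀ x ∈ w.drop (i + 1), min (n - 1).toNat ((w.drop (i + 1)).count x) ≤
          (g2c.erase w[i]).count x := by
      intro _ x hx
      by_cases hxe : x = w[i]
      · subst hxe
        rw [List.count_erase_self]
        have h1 := hcnt w[i] hwmem
        have h2 := count_drop_self w i hi
        have h3 := hperm.count w[i]
        omega
      · rw [List.count_erase_of_ne hxe]
        have hxw : x ∈ w := List.mem_of_mem_drop hx
        have h1 := hcnt x hxw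
        have h2 := count_drop_le w (i + 1) x
        have h3 := hperm.count x
        omega
    rcases IH (w.drop (i + 1)) hlt (g2c.erase w[i]) (g1 + w[i]) hcnt' with
      ⟨sub, gf1, heq1, hperm1, hpw1, hmem1⟩
    -- sums of the shrunken group2
    have hsum2 : (g2c.erase w[i]).sum = g2.sum - w[i] := by
      have h1 := (List.perm_cons_erase hmem2).sum_eq
      have h2 := hperm.sum_eq
      simp at h1
      omega
    -- the next iteration's group2 is still a permutation of the original
    have hperm2 : (gf1 ++ [w[i]]).Perm g2 :=
      (List.perm_append_singleton _ _).trans ((List.Perm.cons _ hperm1).trans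
        ((List.perm_cons_erase hmem2).symm.trans hperm))
    rcases ih (gf1 ++ [w[i]]) (sunion result sub)
        (fun j hj => hidx j (List.mem_cons_of_mem _ hj)) hperm2
        (pairwise_sunion _ _ hpw) with ⟨res, gf, heq, hpermf, hpwf, hmemf⟩
    refine ⟨res, gf, ?_, hpermf, hpwf, ?_⟩
    · rw [numSumGo]
      simp only [hi, dif_pos, hrem, heq1, heq]
    · intro a
      rw [hmemf a, mem_sunion, hmem1 a]
      have hgd : w.getD i 0 = w[i] := List.getD_eq_getElem w 0 hi
      have habs : ∀ s' : Int, |(g2c.erase w[i]).sum - (g1 + w[i]) - 2 * s'| =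
          |g2.sum - g1 - 2 * (w.getD i 0 + s')| := by
        intro s'
        rw [hsum2]
        have e : g2.sum - w[i] - (g1 + w[i]) - 2 * s' = g2.sum - g1 - 2 * (w.getD i 0 + s') := by
          rw [hgd]; ring
        rw [e]
      constructor
      · rintro ((h | ⟨s', hs', rfl⟩) | ⟨j, hj, s', hs', rfl⟩)
        · exact Or.inl h
        · refine Or.inr ⟨i, List.mem_cons_self, s', hs', ?_⟩
          rw [← habs s']
        · exact Or.inr ⟨j, List.mem_cons_of_mem _ hj, s', hs', rfl⟩
      · rintro (h | ⟨j, hj, s', hs', rfl⟩)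
        · exact Or.inl (Or.inl h)
        · rcases List.mem_cons.mp hj with rfl | hj
          · refine Or.inl (Or.inr ⟨s', hs', ?_⟩)
            rw [habs s']
          · exact Or.inr ⟨j, hj, s', hs', rfl⟩

/-- full characterisation of A's recursion, by strong induction on the length bound. -/
lemma auxSpec : ∀ (L : Nat) (w : List Int), w.length ≤ L → ∀ (n : Int) (g2 : List Int) (g1 : Int),
    0 ≤ n → (n.toNat ≤ w.length → ∀ x ∈ w, min n.toNat (w.count x) ≤ g2.count x) →
    ∃ res gf, numSumAux n w g2 g1 = some (res, gf) ∧ gf.Perm g2 ∧ res.Pairwise (· < ·) ∧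
      (∀ a, a ∈ res ↔ ∃ s, IsSum w n.toNat s ∧ a = |g2.sum - g1 - 2 * s|) := by
  intro L
  induction L with
  | zero =>
    intro w hw n g2 g1 hn hcnt
    have hwnil : w = [] := by
      cases w with | nil => rfl | cons a l => simp at hw
    subst hwnil
    by_cases hn0 : n = 0
    · subst hn0
      refine ⟨[|g2.sum - g1|], g2, by rw [numSumAux]; simp, List.Perm.refl _, by simp, ?_⟩
      intro a
      simp only [List.mem_singleton]
      constructor
      · rintro rfl
        exact ⟨0, by simp [isSum_zero], by norm_num⟩
      · rintro ⟨s, hs, rfl⟩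
        rw [(isSum_zero [] s).mp (by simpa using hs)]
        norm_num
    · have hrange : (((([] : List Int).length : Int)) - (n - 1)).toNat = 0 := by
        simp only [List.length_nil, Nat.cast_zero]
        omega
      refine ⟨[], g2, ?_, List.Perm.refl _, by simp, ?_⟩
      · rw [numSumAux, hrange]
        simp [hn0, numSumGo]
      · intro a
        simp only [List.not_mem_nil, false_iff, not_exists, not_and]
        intro s hs
        have := isSum_length [] n.toNat s hs
        simp at this
        omega
  | succ L IH =>
    intro w hw n g2 g1 hn hcnt
    by_cases hn0 : n = 0
    · subst hn0
      refine ⟨[|g2.sum - g1|], g2, by rw [numSumAux]; simp, List.Perm.refl _, by simp, ?_⟩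
      intro a
      simp only [List.mem_singleton]
      constructor
      · rintro rfl
        exact ⟨0, by simp [isSum_zero], by norm_num⟩
      · rintro ⟨s, hs, rfl⟩
        rw [(isSum_zero w s).mp (by simpa using hs)]
        norm_num
    · have hn1 : 1 ≤ n := by omega
      by_cases hbig : w.length < n.toNat
      · -- n > len(weights): the range is empty, the result is the empty set
        have hrange : (((w.length : Int)) - (n - 1)).toNat = 0 := by omega
        refine ⟨[], g2, ?_, List.Perm.refl _, by simp, ?_⟩
        · rw [numSumAux, hrange]
          simp [hn0, numSumGo]
        · intro a
          simp only [List.not_mem_nil, false_iff, not_exists, not_and]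
          intro s hs
          exact absurd (isSum_length w n.toNat s hs) (by omega)
      · have hcnt2 : ∀ x ∈ w, min n.toNat (w.count x) ≤ g2.count x := hcnt (by omega)
        have hIH : ∀ w' : List Int, w'.length < w.length → ∀ (g2' : List Int) (g1' : Int),
            ((n - 1).toNat ≤ w'.length → ∀ x ∈ w', min (n - 1).toNat (w'.count x) ≤ g2'.count x) →
            ∃ res gf, numSumAux (n - 1) w' g2' g1' = some (res, gf) ∧ gf.Perm g2' ∧
              res.Pairwise (· < ·) ∧
              (∀ a, a ∈ res ↔ ∃ s, IsSum w' (n - 1).toNat s ∧ a = |g2'.sum - g1' - 2 * s|) := by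
          intro w' hw' g2' g1' hcnt'
          exact IH w' (by omega) (n - 1) g2' g1' (by omega) hcnt'
        have hK : (((w.length : Int)) - (n - 1)).toNat = w.length + 1 - n.toNat := by omega
        rcases goSpec n w g2 g1 hn1 hcnt2 hIH (List.range (w.length + 1 - n.toNat)) g2 []
            (fun i hi => by have := List.mem_range.mp hi; omega) (List.Perm.refl _) (by simp)
          with ⟨res, gf, heq, hperm, hpw, hmem⟩
        refine ⟨res, gf, ?_, hperm, hpw, ?_⟩
        · rw [numSumAux]
          simp only [hn0, if_false, hK]
          exact heq
        · intro a
          rw [hmem a]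
          simp only [List.not_mem_nil, false_or, List.mem_range]
          have hnt : n.toNat = (n.toNat - 1) + 1 := by omega
          have hnt1 : (n - 1).toNat = n.toNat - 1 := by omega
          rw [hnt1]
          constructor
          · rintro ⟨i, hi, s', hs', rfl⟩
            refine ⟨w.getD i 0 + s', ?_, rfl⟩
            rw [hnt]
            exact (isSum_succ_iff w (n.toNat - 1) _).mpr ⟨i, by omega, s', hs', rfl⟩
          · rintro ⟨s, hs, rfl⟩
            rw [hnt] at hs
            rcases (isSum_succ_iff w (n.toNat - 1) s).mp hs with ⟨i, hi, s', hs', rfl⟩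
            exact ⟨i, by omega, s', hs', rfl⟩

-- ===== VERDICT (by name: the statement is the Claim_ definition above) =====
theorem num_sum_spec : Claim_equal_num_sum := by
  intro n weights group2 group1_sum _ hpre
  rcases hpre with ⟨hn, hcnt⟩
  unfold Spec_num_sum
  rcases auxSpec weights.length weights (le_refl _) n group2 group1_sum hn hcnt with
    ⟨res, gf, heq, _, hpw, hmem⟩
  have hA : num_sum n weights group2 group1_sum = res := by
    unfold num_sum
    rw [heq]
    rfl
  rcases alt_spec n weights group2 group1_sum hn with ⟨hpw', hmem'⟩
  rw [hA]
  apply eq_of_pairwise_lt_ext res _ hpw hpw'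
  intro a
  rw [hmem a, hmem' a]
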